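-- pv_equiv track=rewrite | github.com/AndriiD101/Bechalor_project | app/backend/agents/llm_agent.py | _has_four
-- ===== SOURCE A (Python) =====
-- def _has_four(board, piece, rows=6, cols=7):
--     for r in range(rows):
--         for c in range(cols - 3):
--             if all(board[r][c+i] == piece for i in range(4)): return True
--     for c in range(cols):
--         for r in range(rows - 3):
--             if all(board[r+i][c] == piece for i in range(4)): return True
--     for r in range(rows - 3):
--         for c in range(cols - 3):
--             if all(board[r+i][c+i] == piece for i in range(4)): return True
--     for r in range(3, rows):
--         for c in range(cols - 3):
--             if all(board[r-i][c+i] == piece for i in range(4)): return True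
--     return False
-- ===== SOURCE B (Python) =====
-- def _has_four(board, piece, rows=6, cols=7):
--     # Bitboard: encode the piece's cells as bits at c*(rows+1)+r (one padding
--     # bit per column stops wrap-around), then detect four aligned bits with
--     # two shift-and-AND steps per direction.
--     stride = (rows if rows > 0 else 0) + 1
--     bb = 0
--     for c in range(cols):
--         for r in range(rows):
--             if board[r][c] == piece:
--                 bb |= 1 << (c * stride + r)
--     for d in (1, stride - 1, stride, stride + 1):
--         m = bb & (bb >> d)
--         if m & (m >> (2 * d)):
--             return True
--     return False
-- ===== Notes on version B (the rewrite author's own statement) =====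
-- stated objective: alternative
-- what changed: A's four per-direction window-scanning loop nests are replaced by a bitboard: the piece's cells are encoded once as bits at c*(rows+1)+r (one padding bit per column prevents wrap-around) and four-in-a-row is detected with two shift-and-AND steps per direction.
-- outside the precondition, e.g. on _has_four([[1, 1, 1, 1]], 1, 1, 5): A returns True, B raises IndexError
import Mathlib
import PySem

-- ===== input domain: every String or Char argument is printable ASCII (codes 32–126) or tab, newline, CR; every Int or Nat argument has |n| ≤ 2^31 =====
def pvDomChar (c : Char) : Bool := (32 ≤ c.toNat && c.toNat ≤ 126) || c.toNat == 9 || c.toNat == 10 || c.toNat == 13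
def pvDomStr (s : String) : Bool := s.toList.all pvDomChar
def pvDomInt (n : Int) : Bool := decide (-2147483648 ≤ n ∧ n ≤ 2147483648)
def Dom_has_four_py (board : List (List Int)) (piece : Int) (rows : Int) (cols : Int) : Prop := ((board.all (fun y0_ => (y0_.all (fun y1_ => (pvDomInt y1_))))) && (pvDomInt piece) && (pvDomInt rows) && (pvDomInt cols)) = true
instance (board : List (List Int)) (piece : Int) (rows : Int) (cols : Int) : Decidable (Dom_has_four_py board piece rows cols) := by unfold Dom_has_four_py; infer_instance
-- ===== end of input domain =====

-- B is a different algorithm: it encodes the piece's cells once as a bitboard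
-- (bit c*(rows+1)+r, one padding bit per column) and detects four aligned bits
-- with two shift-and-AND steps per direction, instead of A's per-window scans.

-- board[r][c]; the default 0 is never reached inside Pre_ (Python raises IndexError there)
def pvCell (board : List (List Int)) (r c : Int) : Int :=
  (PySem.List.pyGet? ((PySem.List.pyGet? board r).getD []) c).getD 0

-- ===== PORT A =====
def has_four_py (board : List (List Int)) (piece : Int) (rows : Int) (cols : Int) : Bool :=
  ((PySem.List.pyRange 0 rows 1).any fun r =>
    (PySem.List.pyRange 0 (cols - 3) 1).any fun c =>
      (PySem.List.pyRange 0 4 1).all fun i => pvCell board r (c + i) == piece) ||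
  ((PySem.List.pyRange 0 cols 1).any fun c =>
    (PySem.List.pyRange 0 (rows - 3) 1).any fun r =>
      (PySem.List.pyRange 0 4 1).all fun i => pvCell board (r + i) c == piece) ||
  ((PySem.List.pyRange 0 (rows - 3) 1).any fun r =>
    (PySem.List.pyRange 0 (cols - 3) 1).any fun c =>
      (PySem.List.pyRange 0 4 1).all fun i => pvCell board (r + i) (c + i) == piece) ||
  ((PySem.List.pyRange 3 rows 1).any fun r =>
    (PySem.List.pyRange 0 (cols - 3) 1).any fun c =>
      (PySem.List.pyRange 0 4 1).all fun i => pvCell board (r - i) (c + i) == piece)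

-- ===== PORT B =====
-- transliteration of Source B; the shift amounts c*stride+r, d and 2*d are
-- nonnegative Python ints here, so .toNat is exact on them
def has_four_py_alt (board : List (List Int)) (piece : Int) (rows : Int) (cols : Int) : Bool :=
  let stride : Int := (if rows > 0 then rows else 0) + 1
  let bb : Nat :=
    (PySem.List.pyRange 0 cols 1).foldl (fun acc c =>
      (PySem.List.pyRange 0 rows 1).foldl (fun acc r =>
        if pvCell board r c == piece then acc ||| (1 <<< (c * stride + r).toNat) else acc) acc) 0
  [(1 : Int), stride - 1, stride, stride + 1].any fun d =>
    let m : Nat := bb &&& (bb >>> d.toNat)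
    (m &&& (m >>> (2 * d).toNat)) != 0

-- ===== PRECONDITION & SPEC =====
-- Pre_ excludes ragged or undersized boards, on which some cell access of the
-- Python programs reads an index outside the board: there the Pythons usually
-- raise IndexError, though A may still return True when a win is scanned before
-- the out-of-range access (see claim cites).
def Pre_has_four_py (board : List (List Int)) (piece : Int) (rows : Int) (cols : Int) : Prop :=
  rows ≤ 0 ∨ cols ≤ 0 ∨
    (rows ≤ (board.length : Int) ∧ ∀ row ∈ board.take rows.toNat, cols ≤ (row.length : Int))
instance (board : List (List Int)) (piece : Int) (rows : Int) (cols : Int) : Decidable (Pre_has_four_py board piece rows cols) := by unfold Pre_has_four_py; infer_instance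

def pvWitness_has_four_py : List (List Int) × Int × Int × Int :=
  ([[0, 0, 0, 0], [0, 1, 0, 0], [0, 0, 1, 0], [1, 0, 0, 1]], 1, 4, 4)

def Spec_has_four_py (board : List (List Int)) (piece : Int) (rows : Int) (cols : Int) (out : Bool) : Prop := out = has_four_py_alt board piece rows cols
instance (board : List (List Int)) (piece : Int) (rows : Int) (cols : Int) (out : Bool) : Decidable (Spec_has_four_py board piece rows cols out) := by unfold Spec_has_four_py; infer_instance

-- ===== CLAIM (what is proved, stated in full; the proofs are below) =====
def Claim_equal_has_four_py : Prop := ∀ (board : List (List Int)) (piece : Int) (rows : Int) (cols : Int), Dom_has_four_py board piece rows cols → Pre_has_four_py board piece rows cols → Spec_has_four_py board piece rows cols (has_four_py board piece rows cols)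

-- ===== LEMMAS AND PROOFS =====

-- the common geometric characterization: a 4-window of `piece` in one of A's
-- four directions, phrased as A's loops see it
def pvWin (board : List (List Int)) (piece : Int) (rows cols : Int) : Prop :=
  (∃ r : Nat, (↑r : Int) < rows ∧ ∃ c : Nat, (↑c : Int) < cols - 3 ∧
    pvCell board ↑r ↑c = piece ∧ pvCell board (↑r) (↑c+1) = piece ∧
    pvCell board (↑r) (↑c+2) = piece ∧ pvCell board (↑r) (↑c+3) = piece) ∨
  (∃ c : Nat, (↑c : Int) < cols ∧ ∃ r : Nat, (↑r : Int) < rows - 3 ∧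
    pvCell board ↑r ↑c = piece ∧ pvCell board (↑r+1) (↑c) = piece ∧
    pvCell board (↑r+2) (↑c) = piece ∧ pvCell board (↑r+3) (↑c) = piece) ∨
  (∃ r : Nat, (↑r : Int) < rows - 3 ∧ ∃ c : Nat, (↑c : Int) < cols - 3 ∧
    pvCell board ↑r ↑c = piece ∧ pvCell board (↑r+1) (↑c+1) = piece ∧
    pvCell board (↑r+2) (↑c+2) = piece ∧ pvCell board (↑r+3) (↑c+3) = piece) ∨
  (∃ r : Nat, (↑r : Int) < rows - 3 ∧ ∃ c : Nat, (↑c : Int) < cols - 3 ∧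
    pvCell board (3+↑r) ↑c = piece ∧ pvCell board (3+↑r-1) (↑c+1) = piece ∧
    pvCell board (3+↑r-2) (↑c+2) = piece ∧ pvCell board ↑r (↑c+3) = piece)

set_option maxHeartbeats 1000000 in
theorem pv_A_iff (board : List (List Int)) (piece : Int) (rows cols : Int) :
    has_four_py board piece rows cols = true ↔ pvWin board piece rows cols := by
  have h4 : PySem.List.pyRange 0 4 1 = [0, 1, 2, 3] := by decide
  unfold has_four_py pvWin
  simp [PySem.List.pyRange_one, List.any_map, List.mem_range, h4, Function.comp_def]
  rw [or_assoc, or_assoc]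

-- ---- the bitboard, in Nat form ----

def pvBB (board : List (List Int)) (piece : Int) (R C : Nat) : Nat :=
  (List.range C).foldl (fun (acc : Nat) (c : Nat) =>
    (List.range R).foldl (fun (acc : Nat) (r : Nat) =>
      if pvCell board ↑r ↑c == piece then acc ||| (1 <<< (c * (R+1) + r)) else acc) acc) 0

def pvAltN (board : List (List Int)) (piece : Int) (R C : Nat) : Bool :=
  [1, R, R+1, R+2].any fun d =>
    let bb := pvBB board piece R C
    let m := bb &&& (bb >>> d)
    (m &&& (m >>> (2*d))) != 0

theorem pv_alt_eq (board : List (List Int)) (piece : Int) (rows cols : Int) :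
    has_four_py_alt board piece rows cols = pvAltN board piece rows.toNat cols.toNat := by
  unfold has_four_py_alt pvAltN
  have hstride : (if rows > 0 then rows else 0) + 1 = ((rows.toNat : Int) + 1) := by
    split_ifs <;> omega
  simp only [hstride]
  have hidx : ∀ c r : Nat, ((↑c * (max rows 0 + 1) + ↑r : Int)).toNat = c * (rows.toNat + 1) + r := by
    intro c r
    rw [show ((↑c * (max rows 0 + 1) + ↑r : Int)) = ((c * (rows.toNat + 1) + r : Nat) : Int) by
      rw [← Int.toNat_eq_max]; push_cast; ring, Int.toNat_natCast]
  have hbb : (PySem.List.pyRange 0 cols 1).foldl (fun acc c =>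
      (PySem.List.pyRange 0 rows 1).foldl (fun acc r =>
        if pvCell board r c == piece then acc ||| (1 <<< (c * ((rows.toNat : Int) + 1) + r).toNat) else acc) acc) 0
      = pvBB board piece rows.toNat cols.toNat := by
    unfold pvBB
    rw [PySem.List.pyRange_one 0 cols, List.foldl_map]
    congr 1
    · funext acc c
      rw [PySem.List.pyRange_one 0 rows, List.foldl_map]
      congr 1
      · funext acc' r
        simp [hidx]
      · simp
    · simp
  rw [hbb]
  have h1 : ((1 : Int)).toNat = 1 := rfl
  have h2 : ((rows.toNat : Int) + 1 - 1).toNat = rows.toNat := by omega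
  have h3 : ((rows.toNat : Int) + 1).toNat = rows.toNat + 1 := by omega
  have h4 : ((rows.toNat : Int) + 1 + 1).toNat = rows.toNat + 2 := by omega
  have h5 : ((2 : Int) * 1).toNat = 2 * 1 := rfl
  have h6 : ((2 : Int) * ((rows.toNat : Int) + 1 - 1)).toNat = 2 * rows.toNat := by omega
  have h7 : ((2 : Int) * ((rows.toNat : Int) + 1)).toNat = 2 * (rows.toNat + 1) := by omega
  have h8 : ((2 : Int) * ((rows.toNat : Int) + 1 + 1)).toNat = 2 * (rows.toNat + 2) := by omega
  simp only [List.any_cons, List.any_nil, h1, h2, h3, h4, h5, h6, h7, h8, Bool.or_false]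

-- "bit n of the bitboard is set": the cell with code n holds the piece
def pvSB (board : List (List Int)) (piece : Int) (R C n : Nat) : Prop :=
  ∃ c r : Nat, c < C ∧ r < R ∧ pvCell board ↑r ↑c = piece ∧ c*(R+1)+r = n

theorem pv_testBit_foldl {α : Type} (f : α → Nat) (p : α → Bool) (l : List α) (acc n : Nat) :
    (l.foldl (fun a x => if p x then a ||| 1 <<< f x else a) acc).testBit n =
    (acc.testBit n || l.any fun x => p x && decide (f x = n)) := by
  induction l generalizing acc with
  | nil => simp
  | cons x l ih =>
    simp only [List.foldl_cons, List.any_cons, ih]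
    split_ifs with h
    · simp [Nat.testBit_or, Nat.one_shiftLeft, Nat.testBit_two_pow, h]
      cases acc.testBit n <;> simp
    · simp [h]

theorem pv_bb_iff (board : List (List Int)) (piece : Int) (R C n : Nat) :
    (pvBB board piece R C).testBit n = true ↔ pvSB board piece R C n := by
  unfold pvBB pvSB
  have key : ∀ (cs : List Nat) (acc : Nat),
      (cs.foldl (fun (acc : Nat) (c : Nat) =>
        (List.range R).foldl (fun (acc : Nat) (r : Nat) =>
          if pvCell board ↑r ↑c == piece then acc ||| (1 <<< (c * (R+1) + r)) else acc) acc) acc).testBit n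
      = (acc.testBit n || cs.any fun c => (List.range R).any fun r =>
          (pvCell board ↑r ↑c == piece) && decide (c * (R+1) + r = n)) := by
    intro cs
    induction cs with
    | nil => simp
    | cons c cs ih =>
      intro acc
      simp only [List.foldl_cons, List.any_cons, ih]
      rw [pv_testBit_foldl (fun r : Nat => c * (R+1) + r) (fun r : Nat => pvCell board ↑r ↑c == piece)]
      cases acc.testBit n <;> simp
  rw [key]
  simp only [Nat.zero_testBit, Bool.false_or, List.any_eq_true, List.mem_range,
    Bool.and_eq_true, beq_iff_eq, decide_eq_true_eq]
  constructor
  · rintro ⟨c, hc, r, hr, hcell, heq⟩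
    exact ⟨c, r, hc, hr, hcell, heq⟩
  · rintro ⟨c, r, hc, hr, hcell, heq⟩
    exact ⟨c, hc, r, hr, hcell, heq⟩

-- unique decomposition n = c*(R+1)+r with r < R+1
theorem pv_pos_inj {S c1 r1 c2 r2 : Nat} (h1 : r1 < S) (h2 : r2 < S)
    (h : c1*S+r1 = c2*S+r2) : c1 = c2 ∧ r1 = r2 := by
  have hc : c1 = c2 := by
    rcases Nat.lt_trichotomy c1 c2 with hlt | he | hgt
    · have : c1*S+S ≤ c2*S := by
        calc c1*S+S = (c1+1)*S := by ring
        _ ≤ c2*S := Nat.mul_le_mul_right _ hlt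
      omega
    · exact he
    · have : c2*S+S ≤ c1*S := by
        calc c2*S+S = (c2+1)*S := by ring
        _ ≤ c1*S := Nat.mul_le_mul_right _ hgt
      omega
  subst hc
  omega

-- moving one step in each direction, on the bit codes
theorem pv_stepV {board piece R C c r} (hr : r < R)
    (h : pvSB board piece R C (c*(R+1)+r+1)) :
    r+1 < R ∧ pvCell board ↑(r+1) ↑c = piece := by
  obtain ⟨c2, r2, hc2, hr2, hcell, heq⟩ := h
  have he : c2*(R+1)+r2 = c*(R+1)+(r+1) := by omega
  obtain ⟨rfl, rfl⟩ := pv_pos_inj (by omega) (by omega) he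
  exact ⟨hr2, hcell⟩

theorem pv_stepH {board piece R C c r} (hr : r < R)
    (h : pvSB board piece R C (c*(R+1)+r+(R+1))) :
    c+1 < C ∧ pvCell board ↑r ↑(c+1) = piece := by
  obtain ⟨c2, r2, hc2, hr2, hcell, heq⟩ := h
  have hd : (c+1)*(R+1) = c*(R+1)+(R+1) := by ring
  have he : c2*(R+1)+r2 = (c+1)*(R+1)+r := by omega
  obtain ⟨rfl, rfl⟩ := pv_pos_inj (by omega) (by omega) he
  exact ⟨hc2, hcell⟩

theorem pv_stepD {board piece R C c r} (hr : r < R)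
    (h : pvSB board piece R C (c*(R+1)+r+(R+2))) :
    r+1 < R ∧ c+1 < C ∧ pvCell board ↑(r+1) ↑(c+1) = piece := by
  obtain ⟨c2, r2, hc2, hr2, hcell, heq⟩ := h
  have hd : (c+1)*(R+1) = c*(R+1)+(R+1) := by ring
  have he : c2*(R+1)+r2 = (c+1)*(R+1)+(r+1) := by omega
  obtain ⟨rfl, rfl⟩ := pv_pos_inj (by omega) (by omega) he
  exact ⟨hr2, hc2, hcell⟩

theorem pv_stepA {board piece R C c r} (hr : r < R)
    (h : pvSB board piece R C (c*(R+1)+r+R)) :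
    1 ≤ r ∧ c+1 < C ∧ pvCell board ↑(r-1) ↑(c+1) = piece := by
  obtain ⟨c2, r2, hc2, hr2, hcell, heq⟩ := h
  have hd : (c+1)*(R+1) = c*(R+1)+(R+1) := by ring
  rcases Nat.eq_zero_or_pos r with hr0 | hr1
  · exfalso
    have he : c2*(R+1)+r2 = c*(R+1)+R := by omega
    obtain ⟨rfl, rfl⟩ := pv_pos_inj (by omega) (by omega) he
    omega
  · have he : c2*(R+1)+r2 = (c+1)*(R+1)+(r-1) := by omega
    obtain ⟨rfl, rfl⟩ := pv_pos_inj (by omega) (by omega) he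
    exact ⟨hr1, hc2, hcell⟩

theorem pv_chain (x d : Nat) :
    (((x &&& (x >>> d)) &&& ((x &&& (x >>> d)) >>> (2*d))) ≠ 0) ↔
    ∃ n, x.testBit n = true ∧ x.testBit (n+d) = true ∧
      x.testBit (n+2*d) = true ∧ x.testBit (n+3*d) = true := by
  constructor
  · intro h
    obtain ⟨i, hi⟩ := Nat.exists_testBit_of_ne_zero h
    simp only [Nat.testBit_and, Nat.testBit_shiftRight, Bool.and_eq_true] at hi
    obtain ⟨⟨h0, h1⟩, ⟨h2, h3⟩⟩ := hi
    have e1 : d+i = i+d := by omega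
    have e2 : 2*d+i = i+2*d := by omega
    have e3 : d+(2*d+i) = i+3*d := by omega
    rw [e1] at h1; rw [e2] at h2; rw [e3] at h3
    exact ⟨i, h0, h1, h2, h3⟩
  · rintro ⟨n, h0, h1, h2, h3⟩ h
    have hb := congrArg (fun y => y.testBit n) h
    simp only [Nat.testBit_and, Nat.testBit_shiftRight, Nat.zero_testBit] at hb
    rw [show d+(2*d+n) = n+3*d by omega, show d+n = n+d by omega,
      show 2*d+n = n+2*d by omega] at hb
    simp [h0, h1, h2, h3] at hb

-- vertical runs = chains with bit step 1
theorem pv_dirV (board : List (List Int)) (piece : Int) (R C : Nat) :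
    (∃ n, pvSB board piece R C n ∧ pvSB board piece R C (n+1) ∧
      pvSB board piece R C (n+2) ∧ pvSB board piece R C (n+3)) ↔
    (∃ c r : Nat, c < C ∧ r+3 < R ∧ pvCell board ↑r ↑c = piece ∧
      pvCell board ↑(r+1) ↑c = piece ∧ pvCell board ↑(r+2) ↑c = piece ∧
      pvCell board ↑(r+3) ↑c = piece) := by
  constructor
  · rintro ⟨n, h0, h1, h2, h3⟩
    obtain ⟨c, r, hc, hr, p0, rfl⟩ := h0
    obtain ⟨hr1, p1⟩ := pv_stepV hr h1
    rw [show c*(R+1)+r+2 = c*(R+1)+(r+1)+1 by omega] at h2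
    obtain ⟨hr2, p2⟩ := pv_stepV hr1 h2
    rw [show c*(R+1)+r+3 = c*(R+1)+(r+2)+1 by omega] at h3
    obtain ⟨hr3, p3⟩ := pv_stepV hr2 h3
    exact ⟨c, r, hc, by omega, p0, p1, p2, p3⟩
  · rintro ⟨c, r, hc, hr, p0, p1, p2, p3⟩
    exact ⟨c*(R+1)+r,
      ⟨c, r, hc, by omega, p0, rfl⟩,
      ⟨c, r+1, hc, by omega, p1, by omega⟩,
      ⟨c, r+2, hc, by omega, p2, by omega⟩,
      ⟨c, r+3, hc, by omega, p3, by omega⟩⟩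

-- horizontal runs = chains with bit step R+1
theorem pv_dirH (board : List (List Int)) (piece : Int) (R C : Nat) :
    (∃ n, pvSB board piece R C n ∧ pvSB board piece R C (n+(R+1)) ∧
      pvSB board piece R C (n+2*(R+1)) ∧ pvSB board piece R C (n+3*(R+1))) ↔
    (∃ r c : Nat, r < R ∧ c+3 < C ∧ pvCell board ↑r ↑c = piece ∧
      pvCell board ↑r ↑(c+1) = piece ∧ pvCell board ↑r ↑(c+2) = piece ∧
      pvCell board ↑r ↑(c+3) = piece) := by
  have hd1 : ∀ c : Nat, (c+1)*(R+1) = c*(R+1)+(R+1) := fun c => by ring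
  have hd2 : ∀ c : Nat, (c+2)*(R+1) = c*(R+1)+2*(R+1) := fun c => by ring
  have hd3 : ∀ c : Nat, (c+3)*(R+1) = c*(R+1)+3*(R+1) := fun c => by ring
  constructor
  · rintro ⟨n, h0, h1, h2, h3⟩
    obtain ⟨c, r, hc, hr, p0, rfl⟩ := h0
    obtain ⟨hc1, p1⟩ := pv_stepH hr h1
    rw [show c*(R+1)+r+2*(R+1) = (c+1)*(R+1)+r+(R+1) by ring] at h2
    obtain ⟨hc2, p2⟩ := pv_stepH hr h2
    rw [show c*(R+1)+r+3*(R+1) = (c+2)*(R+1)+r+(R+1) by ring] at h3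
    obtain ⟨hc3, p3⟩ := pv_stepH hr h3
    exact ⟨r, c, hr, by omega, p0, p1, p2, p3⟩
  · rintro ⟨r, c, hr, hc, p0, p1, p2, p3⟩
    exact ⟨c*(R+1)+r,
      ⟨c, r, by omega, hr, p0, rfl⟩,
      ⟨c+1, r, by omega, hr, p1, by ring⟩,
      ⟨c+2, r, by omega, hr, p2, by ring⟩,
      ⟨c+3, r, by omega, hr, p3, by ring⟩⟩

-- down-right diagonal runs = chains with bit step R+2
theorem pv_dirD (board : List (List Int)) (piece : Int) (R C : Nat) :
    (∃ n, pvSB board piece R C n ∧ pvSB board piece R C (n+(R+2)) ∧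
      pvSB board piece R C (n+2*(R+2)) ∧ pvSB board piece R C (n+3*(R+2))) ↔
    (∃ r c : Nat, r+3 < R ∧ c+3 < C ∧ pvCell board ↑r ↑c = piece ∧
      pvCell board ↑(r+1) ↑(c+1) = piece ∧ pvCell board ↑(r+2) ↑(c+2) = piece ∧
      pvCell board ↑(r+3) ↑(c+3) = piece) := by
  have hd1 : ∀ c : Nat, (c+1)*(R+1) = c*(R+1)+(R+1) := fun c => by ring
  have hd2 : ∀ c : Nat, (c+2)*(R+1) = c*(R+1)+2*(R+1) := fun c => by ring
  have hd3 : ∀ c : Nat, (c+3)*(R+1) = c*(R+1)+3*(R+1) := fun c => by ring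
  constructor
  · rintro ⟨n, h0, h1, h2, h3⟩
    obtain ⟨c, r, hc, hr, p0, rfl⟩ := h0
    obtain ⟨hr1, hc1, p1⟩ := pv_stepD hr h1
    rw [show c*(R+1)+r+2*(R+2) = (c+1)*(R+1)+(r+1)+(R+2) by ring] at h2
    obtain ⟨hr2, hc2, p2⟩ := pv_stepD hr1 h2
    rw [show c*(R+1)+r+3*(R+2) = (c+2)*(R+1)+(r+2)+(R+2) by ring] at h3
    obtain ⟨hr3, hc3, p3⟩ := pv_stepD hr2 h3
    exact ⟨r, c, by omega, by omega, p0, p1, p2, p3⟩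
  · rintro ⟨r, c, hr, hc, p0, p1, p2, p3⟩
    exact ⟨c*(R+1)+r,
      ⟨c, r, by omega, by omega, p0, rfl⟩,
      ⟨c+1, r+1, by omega, by omega, p1, by ring⟩,
      ⟨c+2, r+2, by omega, by omega, p2, by ring⟩,
      ⟨c+3, r+3, by omega, by omega, p3, by ring⟩⟩

-- up-right (anti-diagonal) runs = chains with bit step R
theorem pv_dirA (board : List (List Int)) (piece : Int) (R C : Nat) :
    (∃ n, pvSB board piece R C n ∧ pvSB board piece R C (n+R) ∧
      pvSB board piece R C (n+2*R) ∧ pvSB board piece R C (n+3*R)) ↔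
    (∃ r c : Nat, r+3 < R ∧ c+3 < C ∧ pvCell board ↑(r+3) ↑c = piece ∧
      pvCell board ↑(r+2) ↑(c+1) = piece ∧ pvCell board ↑(r+1) ↑(c+2) = piece ∧
      pvCell board ↑r ↑(c+3) = piece) := by
  have hd1 : ∀ c : Nat, (c+1)*(R+1) = c*(R+1)+(R+1) := fun c => by ring
  have hd2 : ∀ c : Nat, (c+2)*(R+1) = c*(R+1)+2*(R+1) := fun c => by ring
  have hd3 : ∀ c : Nat, (c+3)*(R+1) = c*(R+1)+3*(R+1) := fun c => by ring
  constructor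
  · rintro ⟨n, h0, h1, h2, h3⟩
    obtain ⟨c, r, hc, hr, p0, rfl⟩ := h0
    obtain ⟨hge1, hc1, p1⟩ := pv_stepA hr h1
    rw [show c*(R+1)+r+2*R = (c+1)*(R+1)+(r-1)+R by rw [hd1 c]; omega] at h2
    obtain ⟨hge2, hc2, p2⟩ := pv_stepA (by omega) h2
    rw [show c*(R+1)+r+3*R = (c+2)*(R+1)+(r-2)+R by rw [hd2 c]; omega] at h3
    obtain ⟨hge3, hc3, p3⟩ := pv_stepA (by omega) h3
    refine ⟨r-3, c, by omega, by omega, ?_, ?_, ?_, ?_⟩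
    · rwa [show r-3+3 = r by omega]
    · rwa [show r-3+2 = r-1 by omega]
    · rwa [show r-3+1 = r-1-1 by omega]
    · rwa [show r-3 = r-1-1-1 by omega]
  · rintro ⟨r, c, hr, hc, p0, p1, p2, p3⟩
    exact ⟨c*(R+1)+(r+3),
      ⟨c, r+3, by omega, by omega, p0, rfl⟩,
      ⟨c+1, r+2, by omega, by omega, p1, by ring⟩,
      ⟨c+2, r+1, by omega, by omega, p2, by ring⟩,
      ⟨c+3, r, by omega, by omega, p3, by ring⟩⟩

set_option maxHeartbeats 1000000 in
theorem pv_B_iff (board : List (List Int)) (piece : Int) (rows cols : Int) :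
    has_four_py_alt board piece rows cols = true ↔ pvWin board piece rows cols := by
  rw [pv_alt_eq]
  unfold pvAltN
  simp only [List.any_cons, List.any_nil, Bool.or_false, Bool.or_eq_true, bne_iff_ne]
  rw [pv_chain, pv_chain, pv_chain, pv_chain]
  simp only [pv_bb_iff, Nat.reduceMul]
  rw [pv_dirV, pv_dirA, pv_dirH, pv_dirD]
  have c1 : ∀ m : Nat, ((m+1 : Nat) : Int) = (m : Int)+1 := fun m => by push_cast; ring
  have c2 : ∀ m : Nat, ((m+2 : Nat) : Int) = (m : Int)+2 := fun m => by push_cast; ring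
  have c3 : ∀ m : Nat, ((m+3 : Nat) : Int) = (m : Int)+3 := fun m => by push_cast; ring
  have a0 : ∀ m : Nat, ((m+3 : Nat) : Int) = 3+(m : Int) := fun m => by push_cast; ring
  have a1 : ∀ m : Nat, ((m+2 : Nat) : Int) = 3+(m : Int)-1 := fun m => by push_cast; ring
  have a2 : ∀ m : Nat, ((m+1 : Nat) : Int) = 3+(m : Int)-2 := fun m => by push_cast; ring
  unfold pvWin
  constructor
  · rintro (hV | hA | hH | hD)
    · obtain ⟨c, r, hc, hr, p0, p1, p2, p3⟩ := hV
      rw [c1 r] at p1; rw [c2 r] at p2; rw [c3 r] at p3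
      exact Or.inr (Or.inl ⟨c, by omega, r, by omega, p0, p1, p2, p3⟩)
    · obtain ⟨r, c, hr, hc, p0, p1, p2, p3⟩ := hA
      rw [a0 r] at p0; rw [a1 r, c1 c] at p1; rw [a2 r, c2 c] at p2; rw [c3 c] at p3
      exact Or.inr (Or.inr (Or.inr ⟨r, by omega, c, by omega, p0, p1, p2, p3⟩))
    · obtain ⟨r, c, hr, hc, p0, p1, p2, p3⟩ := hH
      rw [c1 c] at p1; rw [c2 c] at p2; rw [c3 c] at p3
      exact Or.inl ⟨r, by omega, c, by omega, p0, p1, p2, p3⟩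
    · obtain ⟨r, c, hr, hc, p0, p1, p2, p3⟩ := hD
      rw [c1 r, c1 c] at p1; rw [c2 r, c2 c] at p2; rw [c3 r, c3 c] at p3
      exact Or.inr (Or.inr (Or.inl ⟨r, by omega, c, by omega, p0, p1, p2, p3⟩))
  · rintro (hH | hV | hD | hA)
    · obtain ⟨r, hr, c, hc, p0, p1, p2, p3⟩ := hH
      refine Or.inr (Or.inr (Or.inl ⟨r, c, by omega, by omega, p0, ?_, ?_, ?_⟩))
      · rw [c1 c]; exact p1
      · rw [c2 c]; exact p2
      · rw [c3 c]; exact p3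
    · obtain ⟨c, hc, r, hr, p0, p1, p2, p3⟩ := hV
      refine Or.inl ⟨c, r, by omega, by omega, p0, ?_, ?_, ?_⟩
      · rw [c1 r]; exact p1
      · rw [c2 r]; exact p2
      · rw [c3 r]; exact p3
    · obtain ⟨r, hr, c, hc, p0, p1, p2, p3⟩ := hD
      refine Or.inr (Or.inr (Or.inr ⟨r, c, by omega, by omega, p0, ?_, ?_, ?_⟩))
      · rw [c1 r, c1 c]; exact p1
      · rw [c2 r, c2 c]; exact p2
      · rw [c3 r, c3 c]; exact p3
    · obtain ⟨r, hr, c, hc, p0, p1, p2, p3⟩ := hA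
      refine Or.inr (Or.inl ⟨r, c, by omega, by omega, ?_, ?_, ?_, ?_⟩)
      · rw [a0 r]; exact p0
      · rw [a1 r, c1 c]; exact p1
      · rw [a2 r, c2 c]; exact p2
      · rw [c3 c]; exact p3

-- ===== VERDICT (by name: the statement is the Claim_ definition above) =====
theorem has_four_py_spec : Claim_equal_has_four_py := by
  intro board piece rows cols _ _
  unfold Spec_has_four_py
  rw [Bool.eq_iff_iff, pv_A_iff, pv_B_iff]
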